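-- pv_equiv track=rewrite | github.com/darkcohiba/The-Coding-Interview-Bootcamp-Algorithms-Data-Structures | practice-algos/ibm_shopkeeper/feb_9.py | min_moves_to_median
-- ===== SOURCE A (Python) =====
-- def min_moves_to_median(price, k):
--     n = len(price)
--
--     # Step 1: Sort the array
--     price.sort()
--
--     # Step 2: Find the current median
--     current_median = price[n // 2]
--
--     # Step 3: Calculate the difference between current median and desired median
--     moves = abs(current_median - k)
--
--     # Step 4: Iterate through prices and calculate total moves
--     for i in range(n // 2):
--         if price[i] > k:
--             moves += price[i] - k
--
--     for i in range(n // 2 + 1, n):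
--         if price[i] < k:
--             moves += k - price[i]
--
--     # Step 5: Return the total number of moves
--     return moves
-- ===== SOURCE B (Python) =====
-- def _select(xs, i):
--     # i-th smallest of xs (0-based) by three-way quickselect, middle-element pivot
--     p = xs[len(xs) // 2]
--     lt = [x for x in xs if x < p]
--     eq_count = 0
--     for x in xs:
--         if x == p:
--             eq_count += 1
--     gt = [x for x in xs if x > p]
--     if i < len(lt):
--         return _select(lt, i)
--     if i < len(lt) + eq_count:
--         return p
--     return _select(gt, i - len(lt) - eq_count)
--
--
-- def min_moves_to_median(price, k):
--     n = len(price)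
--     mid = n // 2
--     m = _select(price, mid)
--     if k >= m:
--         cnt = 0
--         total = 0
--         for x in price:
--             if x > m:
--                 cnt += 1
--                 if x < k:
--                     total += k - x
--         return total + (n - mid - cnt) * (k - m)
--     else:
--         cnt = 0
--         total = 0
--         for x in price:
--             if x < m:
--                 cnt += 1
--                 if x > k:
--                     total += x - k
--         return total + (mid + 1 - cnt) * (m - k)
-- ===== Notes on version B (the rewrite author's own statement) =====
-- stated objective: alternative
-- what changed: B replaces A's full sort followed by two index-range loops over the sorted halves with a three-way quickselect for the median and a single count-based pass over the unsorted list (a closed-form correction term accounts for the duplicates of the median).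
-- outside the precondition, e.g. on min_moves_to_median([], 5): A raises IndexError, B raises IndexError
import Mathlib
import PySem

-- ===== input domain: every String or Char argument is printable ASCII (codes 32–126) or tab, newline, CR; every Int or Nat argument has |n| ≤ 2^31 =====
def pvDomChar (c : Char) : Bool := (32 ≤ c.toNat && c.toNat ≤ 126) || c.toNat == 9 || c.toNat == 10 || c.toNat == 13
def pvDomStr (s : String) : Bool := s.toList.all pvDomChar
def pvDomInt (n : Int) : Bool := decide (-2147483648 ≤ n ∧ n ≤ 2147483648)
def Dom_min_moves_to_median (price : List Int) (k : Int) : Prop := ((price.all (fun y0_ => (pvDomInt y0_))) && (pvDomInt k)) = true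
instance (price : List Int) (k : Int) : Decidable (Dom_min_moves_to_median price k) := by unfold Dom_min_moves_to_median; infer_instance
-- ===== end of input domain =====

-- B replaces A's sort-then-two-indexed-loops by a three-way quickselect for the median plus one
-- count-based pass over the unsorted list (objective: alternative algorithm, similar cost).
-- NOTE: A sorts `price` in place (caller-visible mutation); B does not mutate. Equivalence is about the return value.

-- ===== PORT A =====
def min_moves_to_median (price : List Int) (k : Int) : Int :=
  let n : Int := PySem.List.len price
  let s := PySem.List.sorted price (fun x => x) false
  let current_median := PySem.List.pyGetD s (PySem.Int.floordiv n 2) 0   -- price[n//2]; IndexError on [] excluded by Pre_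
  let moves := |current_median - k|
  let moves := (PySem.List.pyRange 0 (PySem.Int.floordiv n 2) 1).foldl
      (fun acc i => if PySem.List.pyGetD s i 0 > k then acc + (PySem.List.pyGetD s i 0 - k) else acc) moves
  let moves := (PySem.List.pyRange (PySem.Int.floordiv n 2 + 1) n 1).foldl
      (fun acc i => if PySem.List.pyGetD s i 0 < k then acc + (k - PySem.List.pyGetD s i 0) else acc) moves
  moves

-- ===== PORT B =====
-- helper `_select` of Source B: i-th smallest by three-way quickselect, middle pivot.
-- (on [] Python raises IndexError — excluded by Pre_; the `if xs = []` guard only totalizes)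
def pvSelect (xs : List Int) (i : Int) : Int :=
  if hx : xs = [] then 0
  else
    let p := xs.getD (xs.length / 2) 0
    let lt := xs.filter (fun x => x < p)
    let eqc : Int := xs.foldl (fun c x => if x == p then c + 1 else c) 0
    let gt := xs.filter (fun x => p < x)
    if i < (lt.length : Int) then pvSelect lt i
    else if i < (lt.length : Int) + eqc then p
    else pvSelect gt (i - (lt.length : Int) - eqc)
termination_by xs.length
decreasing_by
  · have hp : xs.getD (xs.length / 2) 0 ∈ xs := by
      rw [List.getD_eq_getElem _ _ (Nat.div_lt_self (List.length_pos_of_ne_nil hx) one_lt_two)]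
      exact xs.getElem_mem _
    rw [List.length_unattach, ← List.countP_eq_length_filter,
        List.countP_attach (l := xs) (p := fun x => decide (x < xs.getD (xs.length / 2) 0)),
        List.countP_eq_length_filter]
    refine List.length_filter_lt_length_iff_exists.mpr ⟨_, hp, ?_⟩
    simp
  · have hp : xs.getD (xs.length / 2) 0 ∈ xs := by
      rw [List.getD_eq_getElem _ _ (Nat.div_lt_self (List.length_pos_of_ne_nil hx) one_lt_two)]
      exact xs.getElem_mem _
    rw [List.length_unattach, ← List.countP_eq_length_filter,
        List.countP_attach (l := xs) (p := fun x => decide (xs.getD (xs.length / 2) 0 < x)),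
        List.countP_eq_length_filter]
    refine List.length_filter_lt_length_iff_exists.mpr ⟨_, hp, ?_⟩
    simp

def min_moves_to_median_alt (price : List Int) (k : Int) : Int :=
  let n : Int := price.length
  let mid := PySem.Int.floordiv n 2
  let m := pvSelect price mid
  if k ≥ m then
    let r := price.foldl (fun (s : Int × Int) x =>
        if x > m then (s.1 + 1, if x < k then s.2 + (k - x) else s.2) else s) (0, 0)
    r.2 + (n - mid - r.1) * (k - m)
  else
    let r := price.foldl (fun (s : Int × Int) x =>
        if x < m then (s.1 + 1, if x > k then s.2 + (x - k) else s.2) else s) (0, 0)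
    r.2 + (mid + 1 - r.1) * (m - k)

-- ===== PRECONDITION & SPEC =====
-- Pre_ excludes only the empty list, on which both Pythons raise IndexError (price[0] of []).
def Pre_min_moves_to_median (price : List Int) (k : Int) : Prop := price ≠ []
instance (price : List Int) (k : Int) : Decidable (Pre_min_moves_to_median price k) := by
  unfold Pre_min_moves_to_median; infer_instance
def pvWitness_min_moves_to_median : List Int × Int := ([3, 1, 2], 2)

def Spec_min_moves_to_median (price : List Int) (k : Int) (out : Int) : Prop := out = min_moves_to_median_alt price k
instance (price : List Int) (k : Int) (out : Int) : Decidable (Spec_min_moves_to_median price k out) := by unfold Spec_min_moves_to_median; infer_instance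

-- ===== CLAIM (what is proved, stated in full; the proofs are below) =====
def Claim_equal_min_moves_to_median : Prop := ∀ (price : List Int) (k : Int), Dom_min_moves_to_median price k → Pre_min_moves_to_median price k → Spec_min_moves_to_median price k (min_moves_to_median price k)

-- ===== LEMMAS AND PROOFS =====

-- countP of a list split by trichotomy around a pivot p
lemma pv_countP_tri (xs : List Int) (p : Int) (q : Int → Bool) :
    xs.countP q = (xs.filter (fun x => decide (x < p))).countP q
      + xs.countP (fun x => decide (x = p) && q x)
      + (xs.filter (fun x => decide (p < x))).countP q := by
  induction xs with
  | nil => simp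
  | cons a t ih =>
    rcases lt_trichotomy a p with h | h | h
    · simp [List.countP_cons, List.filter_cons, h, ne_of_lt h, lt_asymm h]; omega
    · subst h; simp [List.countP_cons, List.filter_cons, lt_irrefl]; omega
    · simp [List.countP_cons, List.filter_cons, h, ne_of_gt h, lt_asymm h]; omega

lemma pv_length_tri (xs : List Int) (p : Int) :
    xs.length = (xs.filter (fun x => decide (x < p))).length
      + xs.countP (fun x => decide (x = p))
      + (xs.filter (fun x => decide (p < x))).length := by
  have h := pv_countP_tri xs p (fun _ => true)
  simpa [List.countP_true, ← List.countP_eq_length_filter] using h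

lemma pv_eqc_eq (xs : List Int) (p : Int) :
    xs.foldl (fun c x => if x == p then c + 1 else c) 0
      = (xs.countP (fun x => decide (x = p)) : Int) := by
  have h := PySem.List.foldl_if_add_one (fun x => x == p) xs 0
  simpa [List.countP, beq_iff_eq] using h

-- count characterization of pvSelect: it is a member whose rank brackets i
lemma pv_select_char (n : Nat) : ∀ (xs : List Int), xs.length = n → ∀ (i : Int), 0 ≤ i →
    i < (xs.length : Int) →
    pvSelect xs i ∈ xs ∧ ((xs.countP (fun x => decide (x < pvSelect xs i)) : Int) ≤ i
      ∧ i < (xs.countP (fun x => decide (x ≤ pvSelect xs i)) : Int)) := by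
  induction n using Nat.strong_induction_on with
  | _ n ih =>
  intro xs hn i h0 hi
  have hxne : xs ≠ [] := by intro h; subst h; simp at hi; omega
  rw [pvSelect]; simp only [dif_neg hxne]
  set p := xs.getD (xs.length / 2) 0 with hp
  have hpmem : p ∈ xs := by
    rw [hp, List.getD_eq_getElem _ _ (Nat.div_lt_self (List.length_pos_of_ne_nil hxne) one_lt_two)]
    exact xs.getElem_mem _
  have htri := pv_length_tri xs p
  have heqc := pv_eqc_eq xs p
  rw [heqc]
  have hltlen : (xs.filter (fun x => decide (x < p))).length < xs.length :=
    List.length_filter_lt_length_iff_exists.mpr ⟨p, hpmem, by simp⟩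
  have hgtlen : (xs.filter (fun x => decide (p < x))).length < xs.length :=
    List.length_filter_lt_length_iff_exists.mpr ⟨p, hpmem, by simp⟩
  split_ifs with h1 h2
  · -- recurse into the < p part
    obtain ⟨hmem, ha, hb⟩ := ih (xs.filter (fun x => decide (x < p))).length (by omega)
      _ rfl i h0 h1
    set m := pvSelect (xs.filter (fun x => decide (x < p))) i with hm
    have hmp : m < p := by simpa using List.of_mem_filter hmem
    refine ⟨List.mem_of_mem_filter hmem, ?_, ?_⟩
    · have ht := pv_countP_tri xs p (fun x => decide (x < m))
      have hz1 : xs.countP (fun x => decide (x = p) && decide (x < m)) = 0 :=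
        List.countP_eq_zero.mpr (by intro x _; simp; omega)
      have hz2 : ((xs.filter (fun x => decide (p < x))).countP (fun x => decide (x < m))) = 0 :=
        List.countP_eq_zero.mpr (by
          intro x hx
          have := List.of_mem_filter hx
          simp at this ⊢; omega)
      omega
    · have ht := pv_countP_tri xs p (fun x => decide (x ≤ m))
      omega
  · -- the pivot itself
    refine ⟨hpmem, ?_, ?_⟩
    · have ht := pv_countP_tri xs p (fun x => decide (x < p))
      have he1 : (xs.filter (fun x => decide (x < p))).countP (fun x => decide (x < p))
          = (xs.filter (fun x => decide (x < p))).length :=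
        List.countP_eq_length.mpr (by intro x hx; simpa using List.of_mem_filter hx)
      have hz1 : xs.countP (fun x => decide (x = p) && decide (x < p)) = 0 :=
        List.countP_eq_zero.mpr (by intro x _; simp; omega)
      have hz2 : ((xs.filter (fun x => decide (p < x))).countP (fun x => decide (x < p))) = 0 :=
        List.countP_eq_zero.mpr (by
          intro x hx; have := List.of_mem_filter hx; simp at this ⊢; omega)
      omega
    · have ht := pv_countP_tri xs p (fun x => decide (x ≤ p))
      have he1 : (xs.filter (fun x => decide (x < p))).countP (fun x => decide (x ≤ p))
          = (xs.filter (fun x => decide (x < p))).length :=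
        List.countP_eq_length.mpr (by
          intro x hx; have := List.of_mem_filter hx; simp at this ⊢; omega)
      have he2 : xs.countP (fun x => decide (x = p) && decide (x ≤ p))
          = xs.countP (fun x => decide (x = p)) :=
        List.countP_congr (by intro x _; simp; omega)
      omega
  · -- recurse into the > p part
    have hged : (0:Int) ≤ i - (xs.filter (fun x => decide (x < p))).length
        - (xs.countP (fun x => decide (x = p)) : Int) := by omega
    have hup : i - (xs.filter (fun x => decide (x < p))).length
        - (xs.countP (fun x => decide (x = p)) : Int)
        < ((xs.filter (fun x => decide (p < x))).length : Int) := by omega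
    obtain ⟨hmem, ha, hb⟩ := ih (xs.filter (fun x => decide (p < x))).length (by omega)
      _ rfl _ hged hup
    set m := pvSelect (xs.filter (fun x => decide (p < x)))
      (i - (xs.filter (fun x => decide (x < p))).length
        - (xs.countP (fun x => decide (x = p)) : Int)) with hm
    have hmp : p < m := by simpa using List.of_mem_filter hmem
    refine ⟨List.mem_of_mem_filter hmem, ?_, ?_⟩
    · have ht := pv_countP_tri xs p (fun x => decide (x < m))
      have he1 : (xs.filter (fun x => decide (x < p))).countP (fun x => decide (x < m))
          = (xs.filter (fun x => decide (x < p))).length :=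
        List.countP_eq_length.mpr (by
          intro x hx; have := List.of_mem_filter hx; simp at this ⊢; omega)
      have he2 : xs.countP (fun x => decide (x = p) && decide (x < m))
          = xs.countP (fun x => decide (x = p)) :=
        List.countP_congr (by intro x _; simp; omega)
      omega
    · have ht := pv_countP_tri xs p (fun x => decide (x ≤ m))
      have he1 : (xs.filter (fun x => decide (x < p))).countP (fun x => decide (x ≤ m))
          = (xs.filter (fun x => decide (x < p))).length :=
        List.countP_eq_length.mpr (by
          intro x hx; have := List.of_mem_filter hx; simp at this ⊢; omega)
      have he2 : xs.countP (fun x => decide (x = p) && decide (x ≤ m))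
          = xs.countP (fun x => decide (x = p)) :=
        List.countP_congr (by intro x _; simp; omega)
      omega

lemma pv_countP_split {α : Type} (l : List α) (q : α → Bool) (j : Nat) :
    l.countP q = (l.take j).countP q + (l.drop j).countP q := by
  rw [← List.countP_append, List.take_append_drop]

-- elements of a prefix of sorted(xs) are ≤ the boundary element
lemma pv_take_le (xs : List Int) (j j2 : Nat) (hj2 : j2 ≤ j + 1)
    (hj : j < (PySem.List.sorted xs (fun x => x) false).length) :
    ∀ x ∈ (PySem.List.sorted xs (fun x => x) false).take j2,
      x ≤ (PySem.List.sorted xs (fun x => x) false)[j] := by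
  intro x hx
  obtain ⟨i2, hi2, rfl⟩ := List.mem_iff_getElem.mp hx
  rw [List.getElem_take]
  have hi2' : i2 ≤ j := by simp [List.length_take] at hi2; omega
  exact PySem.List.sorted_id_getElem_mono xs hi2' hj

-- elements of a suffix of sorted(xs) are ≥ the boundary element
lemma pv_drop_ge (xs : List Int) (j j2 : Nat) (hj2 : j ≤ j2)
    (hj : j < (PySem.List.sorted xs (fun x => x) false).length) :
    ∀ x ∈ (PySem.List.sorted xs (fun x => x) false).drop j2,
      (PySem.List.sorted xs (fun x => x) false)[j] ≤ x := by
  intro x hx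
  obtain ⟨i2, hi2, rfl⟩ := List.mem_iff_getElem.mp hx
  rw [List.getElem_drop]
  have hlt : j2 + i2 < (PySem.List.sorted xs (fun x => x) false).length := by
    rw [List.length_drop] at hi2; omega
  exact PySem.List.sorted_id_getElem_mono xs (by omega : j ≤ j2 + i2) hlt

-- rank characterization of sorted(xs)[j]
lemma pv_sorted_char (xs : List Int) (j : Nat)
    (hj : j < (PySem.List.sorted xs (fun x => x) false).length) :
    ((PySem.List.sorted xs (fun x => x) false).countP
        (fun x => decide (x < (PySem.List.sorted xs (fun x => x) false)[j])) ≤ j)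
    ∧ (j < (PySem.List.sorted xs (fun x => x) false).countP
        (fun x => decide (x ≤ (PySem.List.sorted xs (fun x => x) false)[j]))) := by
  constructor
  · have hsplit := pv_countP_split (PySem.List.sorted xs (fun x => x) false)
      (fun x => decide (x < (PySem.List.sorted xs (fun x => x) false)[j])) j
    have hz : ((PySem.List.sorted xs (fun x => x) false).drop j).countP
        (fun x => decide (x < (PySem.List.sorted xs (fun x => x) false)[j])) = 0 :=
      List.countP_eq_zero.mpr (by
        intro x hx
        have := pv_drop_ge xs j j le_rfl hj x hx
        simp; omega)
    have hle := List.countP_le_length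
      (l := (PySem.List.sorted xs (fun x => x) false).take j)
      (p := fun x => decide (x < (PySem.List.sorted xs (fun x => x) false)[j]))
    have hlen : ((PySem.List.sorted xs (fun x => x) false).take j).length ≤ j := by
      simp [List.length_take]
    omega
  · have hsplit := pv_countP_split (PySem.List.sorted xs (fun x => x) false)
      (fun x => decide (x ≤ (PySem.List.sorted xs (fun x => x) false)[j])) (j+1)
    have hfull : ((PySem.List.sorted xs (fun x => x) false).take (j+1)).countP
        (fun x => decide (x ≤ (PySem.List.sorted xs (fun x => x) false)[j]))
        = ((PySem.List.sorted xs (fun x => x) false).take (j+1)).length :=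
      List.countP_eq_length.mpr (by
        intro x hx
        have := pv_take_le xs j (j+1) le_rfl hj x hx
        simpa using this)
    have hlen : ((PySem.List.sorted xs (fun x => x) false).take (j+1)).length = j+1 := by
      rw [List.length_take]; omega
    omega

-- the rank brackets determine the value uniquely
lemma pv_char_unique (xs : List Int) (i : Int) {m1 m2 : Int}
    (h1a : (xs.countP (fun x => decide (x < m1)) : Int) ≤ i)
    (h1b : i < (xs.countP (fun x => decide (x ≤ m1)) : Int))
    (h2a : (xs.countP (fun x => decide (x < m2)) : Int) ≤ i)
    (h2b : i < (xs.countP (fun x => decide (x ≤ m2)) : Int)) : m1 = m2 := by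
  by_contra hne
  rcases lt_or_gt_of_ne hne with hlt | hlt
  · have hmono := List.countP_mono_left (l := xs)
      (p := fun x => decide (x ≤ m1)) (q := fun x => decide (x < m2))
      (by intro x _ hx; simp at hx ⊢; omega)
    omega
  · have hmono := List.countP_mono_left (l := xs)
      (p := fun x => decide (x ≤ m2)) (q := fun x => decide (x < m1))
      (by intro x _ hx; simp at hx ⊢; omega)
    omega

-- pvSelect computes the j-th element of the sorted list
lemma pv_select_eq_sorted (xs : List Int) (j : Nat) (hj : j < xs.length) :
    pvSelect xs (j : Int)
      = (PySem.List.sorted xs (fun x => x) false)[j]'(by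
          rw [PySem.List.length_sorted]; exact hj) := by
  obtain ⟨hmem, hlo, hhi⟩ := pv_select_char xs.length xs rfl (j : Int)
    (by positivity) (by exact_mod_cast hj)
  have hj' : j < (PySem.List.sorted xs (fun x => x) false).length := by
    rw [PySem.List.length_sorted]; exact hj
  obtain ⟨hsa, hsb⟩ := pv_sorted_char xs j hj'
  have hperm := PySem.List.sorted_perm xs (fun x => x) false
  rw [hperm.countP_eq] at hsa hsb
  exact pv_char_unique xs (j : Int) hlo hhi (by exact_mod_cast hsa) (by exact_mod_cast hsb)

-- A's conditional-accumulator loops as sums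
lemma pv_foldl_if_gt (l : List Int) (k a : Int) :
    l.foldl (fun acc x => if x > k then acc + (x - k) else acc) a
      = a + (l.map (fun x => if x > k then x - k else 0)).sum := by
  induction l generalizing a with
  | nil => simp
  | cons b t ih => simp only [List.foldl_cons, List.map_cons, List.sum_cons]; split_ifs with h <;> rw [ih] <;> ring

lemma pv_foldl_if_lt (l : List Int) (k a : Int) :
    l.foldl (fun acc x => if x < k then acc + (k - x) else acc) a
      = a + (l.map (fun x => if x < k then k - x else 0)).sum := by
  induction l generalizing a with
  | nil => simp
  | cons b t ih => simp only [List.foldl_cons, List.map_cons, List.sum_cons]; split_ifs with h <;> rw [ih] <;> ring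

-- B's single pass as a count and a sum
lemma pv_pair_fold_gt (l : List Int) (m k : Int) (c t : Int) :
    l.foldl (fun (s : Int × Int) x =>
        if x > m then (s.1 + 1, if x < k then s.2 + (k - x) else s.2) else s) (c, t)
      = (c + (l.countP (fun x => decide (m < x)) : Int),
         t + (l.map (fun x => if m < x ∧ x < k then k - x else 0)).sum) := by
  induction l generalizing c t with
  | nil => simp
  | cons b tl ih =>
    simp only [List.foldl_cons, List.map_cons, List.sum_cons, List.countP_cons]
    by_cases h1 : m < b
    · by_cases h2 : b < k
      · rw [if_pos (show b > m from h1)]; simp only [if_pos h2]; rw [ih]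
        simp [Prod.ext_iff, h1, h2] <;> omega
      · rw [if_pos (show b > m from h1)]; simp only [if_neg h2]; rw [ih]
        simp [Prod.ext_iff, h1, h2] <;> omega
    · rw [if_neg (show ¬b > m from h1)]; rw [ih]
      simp [Prod.ext_iff, h1] <;> omega

lemma pv_pair_fold_lt (l : List Int) (m k : Int) (c t : Int) :
    l.foldl (fun (s : Int × Int) x =>
        if x < m then (s.1 + 1, if x > k then s.2 + (x - k) else s.2) else s) (c, t)
      = (c + (l.countP (fun x => decide (x < m)) : Int),
         t + (l.map (fun x => if x < m ∧ k < x then x - k else 0)).sum) := by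
  induction l generalizing c t with
  | nil => simp
  | cons b tl ih =>
    simp only [List.foldl_cons, List.map_cons, List.sum_cons, List.countP_cons]
    by_cases h1 : b < m
    · by_cases h2 : b > k
      · rw [if_pos h1]; simp only [if_pos h2]; rw [ih]
        simp [Prod.ext_iff, h1, h2] <;> omega
      · rw [if_pos h1]; simp only [if_neg h2]; rw [ih]
        simp [Prod.ext_iff, h1, h2] <;> omega
    · rw [if_neg h1]; rw [ih]
      simp [Prod.ext_iff, h1] <;> omega

lemma pv_sum_zero (l : List Int) (f : Int → Int) (h : ∀ x ∈ l, f x = 0) :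
    (l.map f).sum = 0 :=
  List.sum_eq_zero (by intro y hy; obtain ⟨x, hx, rfl⟩ := List.mem_map.mp hy; exact h x hx)

lemma pv_sum_split (l : List Int) (f g : Int → Int) (p : Int → Bool) (c : Int)
    (h : ∀ x ∈ l, f x = g x + (if p x then c else 0)) :
    (l.map f).sum = (l.map g).sum + (l.countP p : Int) * c := by
  induction l with
  | nil => simp
  | cons b t ih =>
    simp only [List.map_cons, List.sum_cons, List.countP_cons]
    rw [ih (fun x hx => h x (List.mem_cons_of_mem b hx)), h b List.mem_cons_self]
    by_cases hb : p b <;> simp [hb] <;> push_cast <;> ring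

lemma pv_count_two_ge (l : List Int) (m : Int) (h : ∀ x ∈ l, m ≤ x) :
    l.countP (fun x => decide (x = m)) + l.countP (fun x => decide (m < x)) = l.length := by
  induction l with
  | nil => simp
  | cons b t ih =>
    have hb := h b List.mem_cons_self
    have ht := ih (fun x hx => h x (List.mem_cons_of_mem b hx))
    simp only [List.countP_cons, List.length_cons]
    rcases eq_or_lt_of_le hb with hbe | hbl
    · simp [← hbe]; omega
    · simp [hbl, hbl.ne']; omega

lemma pv_count_two_le (l : List Int) (m : Int) (h : ∀ x ∈ l, x ≤ m) :
    l.countP (fun x => decide (x = m)) + l.countP (fun x => decide (x < m)) = l.length := by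
  induction l with
  | nil => simp
  | cons b t ih =>
    have hb := h b List.mem_cons_self
    have ht := ih (fun x hx => h x (List.mem_cons_of_mem b hx))
    simp only [List.countP_cons, List.length_cons]
    rcases eq_or_lt_of_le hb with hbe | hbl
    · simp [hbe]; omega
    · simp [hbl, hbl.ne]; omega

-- the main equality
lemma pv_main (price : List Int) (k : Int) (hne : price ≠ []) :
    min_moves_to_median price k = min_moves_to_median_alt price k := by
  have hNpos : 0 < price.length := List.length_pos_of_ne_nil hne
  have hfd : PySem.Int.floordiv ((price.length : Int)) 2 = ((price.length / 2 : Nat) : Int) := by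
    exact_mod_cast PySem.Int.floordiv_natCast price.length 2
  have hMlt : price.length / 2 < price.length := Nat.div_lt_self hNpos one_lt_two
  have hslen : (PySem.List.sorted price (fun x => x) false).length = price.length :=
    PySem.List.length_sorted price (fun x => x) false
  have hMlt' : price.length / 2 < (PySem.List.sorted price (fun x => x) false).length := by omega
  have hperm := PySem.List.sorted_perm price (fun x => x) false
  have hsel := pv_select_eq_sorted price (price.length / 2) hMlt
  set N := price.length with hN
  set M := N / 2 with hM
  set s := PySem.List.sorted price (fun x => x) false with hs
  set v := s[M]'hMlt' with hv
  have hTak1 : ∀ x ∈ s.take (M+1), x ≤ v := by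
    exact pv_take_le price M (M+1) le_rfl hMlt'
  have hTak0 : ∀ x ∈ s.take M, x ≤ v := by
    exact pv_take_le price M M (by omega) hMlt'
  have hDrp0 : ∀ x ∈ s.drop M, v ≤ x := by
    exact pv_drop_ge price M M le_rfl hMlt'
  have hDrp1 : ∀ x ∈ s.drop (M+1), v ≤ x := by
    exact pv_drop_ge price M (M+1) (by omega) hMlt'
  have hsel' : pvSelect price ((M : Nat) : Int) = v := hsel
  rw [min_moves_to_median, min_moves_to_median_alt]
  simp only [PySem.List.len_eq, ← hs, ← hN]
  rw [hfd, hsel']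
  -- A's median access
  have hmed : PySem.List.pyGetD s ((M : Nat) : Int) 0 = v := by
    rw [PySem.List.pyGetD_eq_getElem s 0 (by positivity) (by exact_mod_cast hMlt')]
    simp [hv]
  -- A's loops as list folds
  have htlen : (s.take M).length = M := by rw [List.length_take]; omega
  have hloop1 : ∀ init : Int, (PySem.List.pyRange 0 ((M : Nat) : Int) 1).foldl
      (fun acc i => if PySem.List.pyGetD s i 0 > k then acc + (PySem.List.pyGetD s i 0 - k) else acc) init
      = init + ((s.take M).map (fun x => if x > k then x - k else 0)).sum := by
    intro init
    have hcong : (PySem.List.pyRange 0 ((M : Nat) : Int) 1).foldl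
        (fun acc i => if PySem.List.pyGetD s i 0 > k then acc + (PySem.List.pyGetD s i 0 - k) else acc) init
        = (PySem.List.pyRange 0 ((M : Nat) : Int) 1).foldl
        (fun acc i => if PySem.List.pyGetD (s.take M) i 0 > k then acc + (PySem.List.pyGetD (s.take M) i 0 - k) else acc) init := by
      apply PySem.List.foldl_congr_mem
      intro acc x hx
      have hx' := PySem.List.mem_pyRange_one.mp hx
      have hget : PySem.List.pyGetD s x 0 = PySem.List.pyGetD (s.take M) x 0 := by
        rw [PySem.List.pyGetD_eq_getElem s 0 hx'.1 (by omega : x < ((s.length : Nat) : Int)),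
            PySem.List.pyGetD_eq_getElem (s.take M) 0 hx'.1 (by rw [htlen]; omega)]
        rw [List.getElem_take]
      rw [hget]
    rw [hcong]
    have h2 := PySem.List.foldl_pyRange_zero_pyGetD' (s.take M) 0
      (fun acc x => if x > k then acc + (x - k) else acc) init
    rw [htlen] at h2
    rw [h2, pv_foldl_if_gt]
  have hloop2 : ∀ init : Int, (PySem.List.pyRange (((M : Nat) : Int) + 1) ((N : Nat) : Int) 1).foldl
      (fun acc i => if PySem.List.pyGetD s i 0 < k then acc + (k - PySem.List.pyGetD s i 0) else acc) init
      = init + ((s.drop (M+1)).map (fun x => if x < k then k - x else 0)).sum := by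
    intro init
    have h2 := PySem.List.foldl_pyRange_pyGetD' s 0
      (fun acc x => if x < k then acc + (k - x) else acc) init (by positivity : (0:Int) ≤ (M : Int) + 1)
    rw [hslen] at h2
    have htn : (((M : Nat) : Int) + 1).toNat = M + 1 := by omega
    rw [htn] at h2
    rw [h2, pv_foldl_if_lt]
  rw [hloop1, hloop2, hmed]
  -- shared count facts
  have hdropcons : s.drop M = v :: s.drop (M+1) := List.drop_eq_getElem_cons hMlt'
  by_cases hk : v ≤ k
  · -- k ≥ median
    rw [if_pos (show k ≥ v from hk), pv_pair_fold_gt]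
    simp only [zero_add]
    have habs : |v - k| = k - v := by rw [abs_of_nonpos (by omega)]; ring
    have hS1 : ((s.take M).map (fun x => if x > k then x - k else 0)).sum = 0 :=
      pv_sum_zero _ _ (by
        intro x hx
        have hxv := hTak0 x hx
        rw [if_neg (by omega)])
    have hψχ := pv_sum_split (s.drop (M+1))
      (fun x => if x < k then k - x else 0)
      (fun x => if v < x ∧ x < k then k - x else 0)
      (fun x => decide (x = v)) (k - v)
      (by
        intro x hx
        have hvx := hDrp1 x hx
        rcases eq_or_lt_of_le hvx with heq | hlt
        · rw [← heq]
          by_cases hvk : v < k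
          · simp [hvk, lt_irrefl]
          · have hvk' : v = k := by omega
            simp [hvk', lt_irrefl]
        · simp [hlt, hlt.ne'])
    have hχ0take : ((s.take (M+1)).map (fun x => if v < x ∧ x < k then k - x else 0)).sum = 0 :=
      pv_sum_zero _ _ (by
        intro x hx
        have hxv := hTak1 x hx
        rw [if_neg (by intro hc; omega)])
    have hsum_s : (s.map (fun x => if v < x ∧ x < k then k - x else 0)).sum
        = ((s.take (M+1)).map (fun x => if v < x ∧ x < k then k - x else 0)).sum
          + ((s.drop (M+1)).map (fun x => if v < x ∧ x < k then k - x else 0)).sum := by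
      conv_lhs => rw [← List.take_append_drop (M+1) s, List.map_append, List.sum_append]
    have hχprice : (price.map (fun x => if v < x ∧ x < k then k - x else 0)).sum
        = (s.map (fun x => if v < x ∧ x < k then k - x else 0)).sum :=
      ((hperm.map _).sum_eq).symm
    have hc1 := pv_count_two_ge (s.drop M) v hDrp0
    have hdl : (s.drop M).length = N - M := by rw [List.length_drop, hslen]
    have hcnt_s : price.countP (fun x => decide (v < x)) = s.countP (fun x => decide (v < x)) :=
      (hperm.countP_eq _).symm
    have hsplitc := pv_countP_split s (fun x => decide (v < x)) (M+1)
    have htake0 : (s.take (M+1)).countP (fun x => decide (v < x)) = 0 :=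
      List.countP_eq_zero.mpr (by
        intro x hx
        have hxv := hTak1 x hx
        simp; omega)
    rw [hdropcons] at hc1
    simp only [List.countP_cons, List.length_cons, decide_eq_true_eq] at hc1
    have hkey : ((N : Int) - (M : Int) - (price.countP (fun x => decide (v < x)) : Int))
        = 1 + ((s.drop (M+1)).countP (fun x => decide (x = v)) : Int) := by
      rw [hdropcons] at hdl
      simp only [List.length_cons] at hdl
      simp [lt_irrefl] at hc1
      omega
    rw [habs, hS1, hψχ, hχprice, hsum_s, hχ0take, hkey]
    ring
  · -- k < median
    rw [if_neg (show ¬ k ≥ v from hk), pv_pair_fold_lt]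
    simp only [zero_add]
    push_neg at hk
    have habs : |v - k| = v - k := by rw [abs_of_nonneg (by omega)]
    have hS2 : ((s.drop (M+1)).map (fun x => if x < k then k - x else 0)).sum = 0 :=
      pv_sum_zero _ _ (by
        intro x hx
        have hvx := hDrp1 x hx
        rw [if_neg (by omega)])
    have htksucc : s.take (M+1) = s.take M ++ [v] := by
      rw [List.take_succ]
      congr 1
      rw [List.getElem?_eq_getElem hMlt']
      simp [hv]
    have hφχ := pv_sum_split (s.take (M+1))
      (fun x => if x > k then x - k else 0)
      (fun x => if x < v ∧ k < x then x - k else 0)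
      (fun x => decide (x = v)) (v - k)
      (by
        intro x hx
        have hxv := hTak1 x hx
        rcases eq_or_lt_of_le hxv with heq | hlt
        · rw [heq]
          simp [hk, lt_irrefl]
        · simp [hlt, hlt.ne])
    have hφsplit : ((s.take (M+1)).map (fun x => if x > k then x - k else 0)).sum
        = ((s.take M).map (fun x => if x > k then x - k else 0)).sum + (v - k) := by
      rw [htksucc, List.map_append, List.sum_append]
      simp [hk]
    have hχ0drop : ((s.drop (M+1)).map (fun x => if x < v ∧ k < x then x - k else 0)).sum = 0 :=
      pv_sum_zero _ _ (by
        intro x hx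
        have hvx := hDrp1 x hx
        rw [if_neg (by intro hc; omega)])
    have hsum_s : (s.map (fun x => if x < v ∧ k < x then x - k else 0)).sum
        = ((s.take (M+1)).map (fun x => if x < v ∧ k < x then x - k else 0)).sum
          + ((s.drop (M+1)).map (fun x => if x < v ∧ k < x then x - k else 0)).sum := by
      conv_lhs => rw [← List.take_append_drop (M+1) s, List.map_append, List.sum_append]
    have hχprice : (price.map (fun x => if x < v ∧ k < x then x - k else 0)).sum
        = (s.map (fun x => if x < v ∧ k < x then x - k else 0)).sum :=
      ((hperm.map _).sum_eq).symm
    have hc1 := pv_count_two_le (s.take (M+1)) v hTak1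
    have htl1 : (s.take (M+1)).length = M + 1 := by rw [List.length_take]; omega
    have hcnt_s : price.countP (fun x => decide (x < v)) = s.countP (fun x => decide (x < v)) :=
      (hperm.countP_eq _).symm
    have hsplitc := pv_countP_split s (fun x => decide (x < v)) (M+1)
    have hdrop0 : (s.drop (M+1)).countP (fun x => decide (x < v)) = 0 :=
      List.countP_eq_zero.mpr (by
        intro x hx
        have hvx := hDrp1 x hx
        simp; omega)
    have hkey : ((M : Int) + 1 - (price.countP (fun x => decide (x < v)) : Int))
        = ((s.take (M+1)).countP (fun x => decide (x = v)) : Int) := by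
      omega
    rw [habs, hχprice, hsum_s, hχ0drop, hS2, hkey]
    linarith [hφχ, hφsplit]

-- ===== VERDICT (by name: the statement is the Claim_ definition above) =====
theorem min_moves_to_median_spec : Claim_equal_min_moves_to_median := by
  intro price k _ hpre
  unfold Spec_min_moves_to_median
  exact pv_main price k hpre
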